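-- pv_equiv track=rewrite | github.com/imehtn/TIP_102 | Unit2/sess1/v2_advancedproblems.py | find_travelers
-- ===== SOURCE A (Python) =====
-- def find_travelers(races):
--     losers = []
--     winners = set()
--     #loop through each race
--     for winner, loser in races:
--         #add winners to one list
--         winners.add(winner)
--         #add losers to another list
--         losers.append(loser)
--     #count both lists using Counter
--     from collections import Counter
--     counter = Counter(losers)
--     #append to zeros if no losses and in winners but not in losers
--     zeros = [winner for winner in winners if winner not in counter.keys()]
--     #append losers who have lost once only
--     ones = [key for key, value in counter.items() if value == 1 ]
--
--     #return sorted
--     return [sorted(zeros), sorted(ones)]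
-- ===== SOURCE B (Python) =====
-- def find_travelers(races):
--     # Sort-based: sort both columns once, then derive both answers by ordered scans
--     # (no set/dict/Counter): ones = length-1 runs in sorted losers; zeros = ordered
--     # merge-difference of sorted winners against sorted losers.
--     ws = sorted(w for w, _ in races)
--     losers = sorted(l for _, l in races)
--     n = len(losers)
--
--     # losers with exactly one loss = runs of length 1 in the sorted list
--     ones = []
--     i = 0
--     while i < n:
--         j = i + 1
--         while j < n and losers[j] == losers[i]:
--             j += 1
--         if j == i + 1:
--             ones.append(losers[i])
--         i = j
--
--     # winners that never appear among losers: two-pointer merge difference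
--     zeros = []
--     p = 0
--     q = 0
--     m = len(ws)
--     while q < m:
--         w = ws[q]
--         while q < m and ws[q] == w:
--             q += 1                      # skip duplicate winners
--         while p < n and losers[p] < w:
--             p += 1                      # advance loser pointer
--         if p == n or losers[p] != w:
--             zeros.append(w)
--     return [zeros, ones]
-- ===== Notes on version B (the rewrite author's own statement) =====
-- stated objective: alternative
-- what changed: Replaces A's hash-based counting (set of winners + Counter of losers + membership/count filters) by a sort-based algorithm: sort both columns once, read off one-loss travelers as length-1 runs in the sorted loser list, and compute never-losers by a two-pointer merge difference of sorted winners against sorted losers, so no set/dict/Counter and no final sorts are needed.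
import Mathlib
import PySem

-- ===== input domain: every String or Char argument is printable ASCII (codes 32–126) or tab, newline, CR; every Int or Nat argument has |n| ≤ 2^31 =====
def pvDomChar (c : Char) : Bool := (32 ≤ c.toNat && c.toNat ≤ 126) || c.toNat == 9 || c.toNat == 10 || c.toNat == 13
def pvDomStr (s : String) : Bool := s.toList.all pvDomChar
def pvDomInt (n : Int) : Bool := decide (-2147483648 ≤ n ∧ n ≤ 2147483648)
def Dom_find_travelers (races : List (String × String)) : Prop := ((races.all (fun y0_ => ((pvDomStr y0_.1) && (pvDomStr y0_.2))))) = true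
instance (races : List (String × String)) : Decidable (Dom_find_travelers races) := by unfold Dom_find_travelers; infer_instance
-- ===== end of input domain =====

-- B is a sort-based alternative: one-loss travelers are the length-1 runs of the sorted
-- loser column, never-losers a two-pointer merge difference of the sorted winner column
-- against the sorted loser column; no set/dict/Counter and no final sorts.

-- ===== PORT A =====
def find_travelers (races : List (String × String)) : List (List String) :=
  let st := races.foldl
    (fun (acc : List String × PySem.Set String) wl =>
      (acc.1 ++ [wl.2], PySem.Set.add acc.2 wl.1))
    ([], PySem.Set.empty)
  let losers := st.1
  let winners := st.2
  let counter := PySem.Dict.counter losers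
  let zeros := winners.filter (fun w => !(counter.contains w))
  let ones := (counter.items.filter (fun p => p.2 == 1)).map Prod.fst
  [PySem.List.sorted zeros (fun x => x) false, PySem.List.sorted ones (fun x => x) false]

-- ===== PORT B =====
-- B's outer while loop over the sorted loser list, one iteration per run; the inner
-- 'while j < n and losers[j] == losers[i]: j += 1' is exactly takeWhile/dropWhile of
-- the run of equal elements after position i.
def pvSingles (ls : List String) : List String :=
  match ls with
  | [] => []
  | x :: rest =>
    if rest.takeWhile (fun y => y == x) = [] then
      x :: pvSingles rest
    else
      pvSingles (rest.dropWhile (fun y => y == x))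
termination_by ls.length
decreasing_by
  · simp
  · have := (rest.dropWhile_sublist (fun y => y == x)).length_le
    simp; omega

-- B's two-pointer merge loop: state = (remaining winners suffix at q, remaining losers
-- suffix at p); 'while q < m and ws[q] == w' skips the duplicate-winner run, 'while
-- p < n and losers[p] < w' is dropWhile (< w), 'p == n or losers[p] != w' is the head test.
def pvDiff (ws ls : List String) : List String :=
  match ws with
  | [] => []
  | w :: wt =>
    let wt' := wt.dropWhile (fun y => y == w)
    let ls' := ls.dropWhile (fun l => decide (l < w))
    (if ls'.head? = some w then [] else [w]) ++ pvDiff wt' ls'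
termination_by ws.length
decreasing_by
  have := (wt.dropWhile_sublist (fun y => y == w)).length_le
  simp; omega

def find_travelers_alt (races : List (String × String)) : List (List String) :=
  let ws := PySem.List.sorted (races.map Prod.fst) (fun x => x) false
  let losers := PySem.List.sorted (races.map Prod.snd) (fun x => x) false
  [pvDiff ws losers, pvSingles losers]

-- ===== PRECONDITION & SPEC =====
def Spec_find_travelers (races : List (String × String)) (out : List (List String)) : Prop := out = find_travelers_alt races
instance (races : List (String × String)) (out : List (List String)) : Decidable (Spec_find_travelers races out) := by unfold Spec_find_travelers; infer_instance

-- ===== CLAIM (what is proved, stated in full; the proofs are below) =====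
def Claim_equal_find_travelers : Prop := ∀ (races : List (String × String)), Dom_find_travelers races → Spec_find_travelers races (find_travelers races)

-- ===== LEMMAS AND PROOFS =====

-- a sorted list whose head is not x and that lies entirely at or above x cannot contain x
theorem pvNotMemHead (l : List String) (x : String) (hs : l.Pairwise (· ≤ ·))
    (hle : ∀ y ∈ l, x ≤ y) (hh : l.head? ≠ some x) : x ∉ l := by
  cases l with
  | nil => simp
  | cons h t =>
    intro hm
    rcases List.mem_cons.mp hm with rfl | hm
    · simp at hh
    · have h1 : h ≤ x := (List.pairwise_cons.mp hs).1 x hm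
      have h2 : x ≤ h := hle h (List.mem_cons_self ..)
      exact hh (by simp [le_antisymm h1 h2])

-- after dropping the equal-run of x, x is gone from a sorted tail that lies at or above x
theorem pvNotMemDropEq (rest : List String) (x : String) (hs : rest.Pairwise (· ≤ ·))
    (hle : ∀ y ∈ rest, x ≤ y) : x ∉ rest.dropWhile (fun y => y == x) := by
  refine pvNotMemHead _ x (hs.sublist (rest.dropWhile_sublist _))
    (fun z hz => hle z ((rest.dropWhile_sublist _).mem hz)) ?_
  intro hh
  have hnot := List.head?_dropWhile_not (fun y => y == x) rest
  rw [hh] at hnot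
  simp at hnot

theorem pvSingles_subset (ls : List String) : ∀ x, x ∈ pvSingles ls → x ∈ ls := by
  fun_induction pvSingles ls with
  | case1 => simp
  | case2 x rest h ih =>
    intro y hy
    rcases List.mem_cons.mp hy with rfl | hy
    · exact List.mem_cons_self ..
    · exact List.mem_cons_of_mem _ (ih y hy)
  | case3 x rest h ih =>
    intro y hy
    exact List.mem_cons_of_mem _ ((rest.dropWhile_sublist _).mem (ih y hy))

theorem pvMemSingles (ls : List String) : ls.Pairwise (· ≤ ·) →
    ∀ x, x ∈ pvSingles ls ↔ ls.count x = 1 := by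
  fun_induction pvSingles ls with
  | case1 => intro hs y; simp
  | case2 x rest h ih =>
    intro hs y
    have hrest : rest.Pairwise (· ≤ ·) := (List.pairwise_cons.mp hs).2
    have hle : ∀ z ∈ rest, x ≤ z := (List.pairwise_cons.mp hs).1
    have hxnot : x ∉ rest := by
      refine pvNotMemHead rest x hrest hle ?_
      intro hh
      cases rest with
      | nil => simp at hh
      | cons r t =>
        simp at hh
        subst hh
        simp [List.takeWhile] at h
    by_cases hy : y = x
    · subst hy
      simp [List.count_cons_self, List.count_eq_zero.mpr hxnot]
    · rw [List.count_cons_of_ne (Ne.symm hy)]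
      constructor
      · intro hm
        rcases List.mem_cons.mp hm with rfl | hm
        · exact absurd rfl hy
        · exact (ih hrest y).mp hm
      · intro hc
        exact List.mem_cons_of_mem _ ((ih hrest y).mpr hc)
  | case3 x rest h ih =>
    intro hs y
    have hrest : rest.Pairwise (· ≤ ·) := (List.pairwise_cons.mp hs).2
    have hle : ∀ z ∈ rest, x ≤ z := (List.pairwise_cons.mp hs).1
    set t := rest.dropWhile (fun y => y == x) with ht
    have htsub : t.Sublist rest := rest.dropWhile_sublist _
    have htp : t.Pairwise (· ≤ ·) := hrest.sublist htsub
    have hxt : x ∉ t := pvNotMemDropEq rest x hrest hle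
    have hsplit : rest = rest.takeWhile (fun y => y == x) ++ t :=
      (rest.takeWhile_append_dropWhile (p := fun y => y == x)).symm
    have htw : ∀ z ∈ rest.takeWhile (fun y => y == x), z = x := by
      intro z hz
      have := List.mem_takeWhile_imp hz
      simpa using this
    by_cases hy : y = x
    · subst hy
      constructor
      · intro hm
        exact absurd (pvSingles_subset t y hm) hxt
      · intro hc
        exfalso
        have hcnt : 1 ≤ (rest.takeWhile (fun z => z == y)).count y := by
          cases hq : rest.takeWhile (fun z => z == y) with
          | nil => exact absurd hq h
          | cons a b =>
            have ha : a = y := htw a (by rw [hq]; exact List.mem_cons_self ..)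
            subst ha
            simp [List.count_cons_self]
        have hcc : (y :: rest).count y
            = 1 + ((rest.takeWhile (fun z => z == y)).count y + t.count y) := by
          rw [List.count_cons_self]
          conv_lhs => rw [hsplit]
          rw [List.count_append]
          omega
        rw [hcc] at hc
        omega
    · have hcy : (x :: rest).count y = t.count y := by
        rw [List.count_cons_of_ne (Ne.symm hy)]
        conv_lhs => rw [hsplit]
        rw [List.count_append]
        have h0 : (rest.takeWhile (fun z => z == x)).count y = 0 := by
          rw [List.count_eq_zero]
          intro hm
          exact hy (htw y hm)
        omega
      rw [hcy]
      exact ih htp y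

theorem pvPairwiseSingles (ls : List String) : ls.Pairwise (· ≤ ·) →
    (pvSingles ls).Pairwise (· < ·) := by
  fun_induction pvSingles ls with
  | case1 => intro hs; simp
  | case2 x rest h ih =>
    intro hs
    have hrest : rest.Pairwise (· ≤ ·) := (List.pairwise_cons.mp hs).2
    have hle : ∀ z ∈ rest, x ≤ z := (List.pairwise_cons.mp hs).1
    have hxnot : x ∉ rest := by
      refine pvNotMemHead rest x hrest hle ?_
      intro hh
      cases rest with
      | nil => simp at hh
      | cons r t =>
        simp at hh; subst hh; simp [List.takeWhile] at h
    refine List.pairwise_cons.mpr ⟨?_, ih hrest⟩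
    intro z hz
    have hzr : z ∈ rest := pvSingles_subset rest z hz
    exact lt_of_le_of_ne (hle z hzr) (fun hxz => hxnot (hxz ▸ hzr))
  | case3 x rest h ih =>
    intro hs
    have hrest : rest.Pairwise (· ≤ ·) := (List.pairwise_cons.mp hs).2
    exact ih (hrest.sublist (rest.dropWhile_sublist _))

-- the head test of B's merge loop: after dropping the losers below w, the head is w iff w is a loser
theorem pvHeadDrop (ls : List String) (w : String) (hs : ls.Pairwise (· ≤ ·)) :
    (ls.dropWhile (fun l => decide (l < w))).head? = some w ↔ w ∈ ls := by
  set t := ls.dropWhile (fun l => decide (l < w)) with ht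
  have htsub : t.Sublist ls := ls.dropWhile_sublist _
  constructor
  · intro hh
    exact htsub.mem (List.mem_of_mem_head? hh)
  · intro hm
    have hsplit : ls = ls.takeWhile (fun l => decide (l < w)) ++ t :=
      (ls.takeWhile_append_dropWhile (p := fun l => decide (l < w))).symm
    have hwt : w ∈ t := by
      rcases List.mem_append.mp (hsplit ▸ hm) with hl | hr
      · have := List.mem_takeWhile_imp hl; simp at this
      · exact hr
    cases hq : t with
    | nil => rw [hq] at hwt; simp at hwt
    | cons h tl =>
      have hh : ¬ (h < w) := by
        have hnot := List.head?_dropWhile_not (fun l => decide (l < w)) ls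
        rw [← ht, hq] at hnot
        simpa using hnot
      rw [hq] at hwt
      rcases List.mem_cons.mp hwt with rfl | hwt
      · simp
      · have htp : t.Pairwise (· ≤ ·) := hs.sublist htsub
        rw [hq] at htp
        have : h ≤ w := (List.pairwise_cons.mp htp).1 w hwt
        simp [le_antisymm this (not_lt.mp hh)]

theorem pvDiff_subset (ws ls : List String) : ∀ x, x ∈ pvDiff ws ls → x ∈ ws := by
  induction ws, ls using pvDiff.induct with
  | case1 => simp [pvDiff]
  | case2 ls w wt wt' ls' ih =>
    intro y hy
    rw [pvDiff.eq_def] at hy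
    simp only at hy
    rw [show List.dropWhile (fun y => y == w) wt = wt' from rfl,
        show List.dropWhile (fun l => decide (l < w)) ls = ls' from rfl] at hy
    rcases List.mem_append.mp hy with hl | hr
    · have : y = w := by split at hl <;> simp_all
      subst this
      exact List.mem_cons_self ..
    · exact List.mem_cons_of_mem _ ((wt.dropWhile_sublist _).mem (ih y hr))

theorem pvMemDiff (ws ls : List String) : ws.Pairwise (· ≤ ·) → ls.Pairwise (· ≤ ·) →
    ∀ x, x ∈ pvDiff ws ls ↔ x ∈ ws ∧ x ∉ ls := by
  induction ws, ls using pvDiff.induct with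
  | case1 =>
    intro hw hl y
    simp [pvDiff]
  | case2 ls w wt wt' ls' ih =>
    intro hw hl y
    have hwt : wt.Pairwise (· ≤ ·) := (List.pairwise_cons.mp hw).2
    have hlew : ∀ z ∈ wt, w ≤ z := (List.pairwise_cons.mp hw).1
    have hwt'p : wt'.Pairwise (· ≤ ·) := hwt.sublist (wt.dropWhile_sublist _)
    have hls'p : ls'.Pairwise (· ≤ ·) := hl.sublist (ls.dropWhile_sublist _)
    have hwnot : w ∉ wt' := pvNotMemDropEq wt w hwt hlew
    have hmemwt : ∀ z, z ∈ (w :: wt) ↔ z = w ∨ z ∈ wt' := by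
      intro z
      constructor
      · intro hm
        rcases List.mem_cons.mp hm with rfl | hm
        · exact Or.inl rfl
        · by_cases hz : z = w
          · exact Or.inl hz
          · refine Or.inr ?_
            have hsplit : wt = wt.takeWhile (fun y => y == w) ++ wt' :=
              (wt.takeWhile_append_dropWhile (p := fun y => y == w)).symm
            rcases List.mem_append.mp (hsplit ▸ hm) with htk | htd
            · have := List.mem_takeWhile_imp htk; simp at this; exact absurd this hz
            · exact htd
      · rintro (rfl | hm)
        · exact List.mem_cons_self ..
        · exact List.mem_cons_of_mem _ ((wt.dropWhile_sublist _).mem hm)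
    have hgt : ∀ z ∈ wt', w < z := by
      intro z hz
      exact lt_of_le_of_ne (hlew z ((wt.dropWhile_sublist _).mem hz))
        (fun h => hwnot (h ▸ hz))
    have hmemls : ∀ z, w < z → (z ∈ ls ↔ z ∈ ls') := by
      intro z hzgt
      constructor
      · intro hm
        have hsplit : ls = ls.takeWhile (fun l => decide (l < w)) ++ ls' :=
          (ls.takeWhile_append_dropWhile (p := fun l => decide (l < w))).symm
        rcases List.mem_append.mp (hsplit ▸ hm) with htk | htd
        · have hzw := List.mem_takeWhile_imp htk
          simp only [decide_eq_true_eq] at hzw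
          exact absurd (lt_trans hzw hzgt) (lt_irrefl z)
        · exact htd
      · intro hm
        exact (ls.dropWhile_sublist _).mem hm
    rw [pvDiff.eq_def]
    simp only
    rw [show List.dropWhile (fun y => y == w) wt = wt' from rfl,
        show List.dropWhile (fun l => decide (l < w)) ls = ls' from rfl]
    rw [List.mem_append, ih hwt'p hls'p y, hmemwt y]
    by_cases hhead : ls'.head? = some w
    · have hwls : w ∈ ls := (pvHeadDrop ls w hl).mp hhead
      rw [if_pos hhead]
      simp only [List.not_mem_nil, false_or]
      constructor
      · rintro ⟨hy1, hy2⟩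
        exact ⟨Or.inr hy1, fun hm => hy2 ((hmemls y (hgt y hy1)).mp hm)⟩
      · rintro ⟨rfl | hy1, hy2⟩
        · exact absurd hwls hy2
        · exact ⟨hy1, fun hm => hy2 ((hmemls y (hgt y hy1)).mpr hm)⟩
    · have hwls : w ∉ ls := fun hm => hhead ((pvHeadDrop ls w hl).mpr hm)
      rw [if_neg hhead]
      simp only [List.mem_cons, List.not_mem_nil, or_false]
      constructor
      · rintro (rfl | ⟨hy1, hy2⟩)
        · exact ⟨Or.inl rfl, hwls⟩
        · exact ⟨Or.inr hy1, fun hm => hy2 ((hmemls y (hgt y hy1)).mp hm)⟩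
      · rintro ⟨rfl | hy1, hy2⟩
        · exact Or.inl rfl
        · exact Or.inr ⟨hy1, fun hm => hy2 ((hmemls y (hgt y hy1)).mpr hm)⟩

theorem pvPairwiseDiff (ws ls : List String) : ws.Pairwise (· ≤ ·) →
    (pvDiff ws ls).Pairwise (· < ·) := by
  induction ws, ls using pvDiff.induct with
  | case1 => intro hw; simp [pvDiff]
  | case2 ls w wt wt' ls' ih =>
    intro hw
    have hwt : wt.Pairwise (· ≤ ·) := (List.pairwise_cons.mp hw).2
    have hlew : ∀ z ∈ wt, w ≤ z := (List.pairwise_cons.mp hw).1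
    have hwt'p : wt'.Pairwise (· ≤ ·) := hwt.sublist (wt.dropWhile_sublist _)
    have hwnot : w ∉ wt' := pvNotMemDropEq wt w hwt hlew
    have hrec : (pvDiff wt' ls').Pairwise (· < ·) := ih hwt'p
    have hhd : ∀ z ∈ pvDiff wt' ls', w < z := by
      intro z hz
      have hzw : z ∈ wt' := pvDiff_subset wt' ls' z hz
      exact lt_of_le_of_ne (hlew z ((wt.dropWhile_sublist _).mem hzw))
        (fun h => hwnot (h ▸ hzw))
    rw [pvDiff.eq_def]
    simp only
    rw [show List.dropWhile (fun y => y == w) wt = wt' from rfl,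
        show List.dropWhile (fun l => decide (l < w)) ls = ls' from rfl]
    split
    · rw [List.nil_append]; exact hrec
    · rw [List.singleton_append]; exact List.pairwise_cons.mpr ⟨hhd, hrec⟩

-- '[(k, f k) for k in xs] filtered on the value, projected to keys' is a filter of xs
theorem pvMapFilter {α β : Type} (xs : List α) (f : α → β) (q : β → Bool) :
    (((xs.map (fun k => (k, f k))).filter (fun p => q p.2)).map Prod.fst)
      = xs.filter (fun k => q (f k)) := by
  induction xs with
  | nil => rfl
  | cons x t ih => by_cases h : q (f x) <;> simp [h, ih]

theorem find_travelers_spec : Claim_equal_find_travelers := by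
  intro races _
  show find_travelers races = find_travelers_alt races
  have hst : ∀ (l : List (String × String)) (ls : List String) (ws : PySem.Set String),
      l.foldl (fun (acc : List String × PySem.Set String) wl =>
        (acc.1 ++ [wl.2], PySem.Set.add acc.2 wl.1)) (ls, ws)
      = (ls ++ l.map Prod.snd, (l.map Prod.fst).foldl PySem.Set.add ws) := by
    intro l
    induction l with
    | nil => intro ls ws; simp
    | cons x t ih => intro ls ws; simp [ih]
  have hofl : List.foldl PySem.Set.add PySem.Set.empty (races.map Prod.fst)
      = PySem.Set.ofList (races.map Prod.fst) :=
    (PySem.Set.ofList_eq_foldl _).symm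
  have hwp : (PySem.List.sorted (races.map Prod.fst) (fun x => x) false).Pairwise (· ≤ ·) := by
    simpa using PySem.List.sorted_pairwise (races.map Prod.fst) (fun x => x)
  have hlp : (PySem.List.sorted (races.map Prod.snd) (fun x => x) false).Pairwise (· ≤ ·) := by
    simpa using PySem.List.sorted_pairwise (races.map Prod.snd) (fun x => x)
  have hz : PySem.List.sorted
      ((PySem.Set.ofList (races.map Prod.fst)).filter
        (fun w => !((PySem.Dict.counter (races.map Prod.snd)).contains w)))
      (fun x => x) false
    = pvDiff (PySem.List.sorted (races.map Prod.fst) (fun x => x) false)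
        (PySem.List.sorted (races.map Prod.snd) (fun x => x) false) := by
    apply PySem.List.sorted_eq_of_perm_of_pairwise_lt
    · rw [List.perm_ext_iff_of_nodup
        ((pvPairwiseDiff _ _ hwp).imp ne_of_lt)
        ((PySem.Set.nodup_ofList _).filter _)]
      intro a
      rw [pvMemDiff _ _ hwp hlp a, List.mem_filter]
      simp [PySem.Dict.contains_counter, PySem.Set.mem_ofList, PySem.List.mem_sorted]
    · simpa using pvPairwiseDiff _ _ hwp
  have ho : PySem.List.sorted
      ((PySem.Set.ofList (races.map Prod.snd)).filter
        (fun k => (((races.map Prod.snd).count k : Int) == 1)))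
      (fun x => x) false
    = pvSingles (PySem.List.sorted (races.map Prod.snd) (fun x => x) false) := by
    apply PySem.List.sorted_eq_of_perm_of_pairwise_lt
    · rw [List.perm_ext_iff_of_nodup
        ((pvPairwiseSingles _ hlp).imp ne_of_lt)
        ((PySem.Set.nodup_ofList _).filter _)]
      intro a
      rw [pvMemSingles _ hlp a, List.mem_filter]
      have hc : (PySem.List.sorted (races.map Prod.snd) (fun x => x) false).count a
          = (races.map Prod.snd).count a :=
        (PySem.List.sorted_perm (races.map Prod.snd) (fun x => x) false).count_eq a
      rw [hc]
      simp only [PySem.Set.mem_ofList, beq_iff_eq]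
      constructor
      · intro h1
        refine ⟨List.count_pos_iff.mp (by omega), by exact_mod_cast h1⟩
      · rintro ⟨_, h2⟩
        exact_mod_cast h2
    · simpa using pvPairwiseSingles _ hlp
  simp only [find_travelers, find_travelers_alt, hst, List.nil_append, hofl]
  rw [PySem.Dict.items_counter,
    pvMapFilter (PySem.Set.ofList (races.map Prod.snd))
      (fun k => (((races.map Prod.snd).count k : Int))) (fun v => v == 1)]
  rw [hz, ho]
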